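-- pv_equiv track=rewrite | github.com/matheuscordeiro/random-problems | hackerland_radio.py | hackerlandRadioTransmitters
-- ===== SOURCE A (Python) =====
-- def hackerlandRadioTransmitters(x, k):
--     x_sorted = sorted(x)
--     transmitters = 0
--     i = 0
--     while i < len(x):
--         transmitters += 1
--
--         loc = x_sorted[i] + k
--         while i < len(x) and x_sorted[i] <= loc:
--             i += 1
--
--         i = i - 1
--         loc = x_sorted[i] + k
--         while i < len(x) and x_sorted[i] <= loc:
--             i += 1
--
--     return transmitters
-- ===== SOURCE B (Python) =====
-- def hackerlandRadioTransmitters(x, k):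
--     count = 0
--     start = None  # leftmost house of the currently open group, or None
--     t = None      # transmitter position chosen for the last counted group
--     for h in sorted(x):
--         if start is None:
--             if t is not None and h <= t + k:
--                 continue  # already covered by the last transmitter
--             count += 1
--             start = h
--             t = h
--         else:
--             if h <= start + k:
--                 t = h  # transmitter can still slide right to h
--             elif h <= t + k:
--                 start = None  # group sealed; h covered by t
--             else:
--                 count += 1
--                 start = h
--                 t = h
--     return count
-- ===== Notes on version B (the rewrite author's own statement) =====
-- stated objective: idiomatic
-- what changed: Replaced A's nested index-based while loops (with the i = i - 1 backtrack and re-scan of already-visited houses) by a single forward pass over the sorted list driven by a three-variable state machine (count, open-group start, last transmitter position).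
import Mathlib
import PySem

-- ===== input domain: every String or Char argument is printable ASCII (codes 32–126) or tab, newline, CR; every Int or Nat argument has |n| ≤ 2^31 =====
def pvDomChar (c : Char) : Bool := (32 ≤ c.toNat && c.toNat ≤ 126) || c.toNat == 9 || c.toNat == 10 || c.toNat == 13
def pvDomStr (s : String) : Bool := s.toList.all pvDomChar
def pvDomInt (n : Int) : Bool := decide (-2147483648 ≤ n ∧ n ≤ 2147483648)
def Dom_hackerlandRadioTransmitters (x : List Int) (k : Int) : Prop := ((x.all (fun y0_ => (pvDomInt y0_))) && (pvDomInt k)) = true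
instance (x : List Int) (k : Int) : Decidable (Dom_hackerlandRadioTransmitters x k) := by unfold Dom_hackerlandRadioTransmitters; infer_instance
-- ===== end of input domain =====

-- B replaces A's nested index-based while loops (with the i = i - 1 backtrack and re-scan)
-- by a single forward pass over the sorted list driven by a three-variable state machine.


-- ===== PORT A =====
-- the inner 'while i < len(x) and x_sorted[i] <= loc: i += 1' loops (fuel = len suffices: each pass advances i)
def pvInnerA (s : List Int) (loc : Int) (i : Int) : Nat → Int
  | 0 => i
  | fuel + 1 =>
    if i < (s.length : Int) ∧ (PySem.List.pyGet? s i).getD 0 ≤ loc then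
      pvInnerA s loc (i + 1) fuel
    else i

-- the outer 'while i < len(x)' loop over state (i, transmitters); fuel = len+1 suffices (i strictly grows)
def pvOuterA (s : List Int) (k : Int) : Nat → Int → Int → Int
  | 0, _, transmitters => transmitters
  | fuel + 1, i, transmitters =>
    if i < (s.length : Int) then
      let transmitters := transmitters + 1
      let loc := (PySem.List.pyGet? s i).getD 0 + k
      let i := pvInnerA s loc i s.length
      let i := i - 1
      let loc := (PySem.List.pyGet? s i).getD 0 + k
      let i := pvInnerA s loc i s.length
      pvOuterA s k fuel i transmitters
    else transmitters

def hackerlandRadioTransmitters (x : List Int) (k : Int) : Int :=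
  let x_sorted := PySem.List.sorted x (fun v => v) false
  pvOuterA x_sorted k (x_sorted.length + 1) 0 0

-- ===== PORT B =====
-- one step of B's for-loop; state = (count, start of open group, position picked for the last transmitter).
-- Python reaches 'h <= t + k' only with t set; '.getD 0' is that (never-defaulted) access.
def pvStepB (k : Int) (st : Int × Option Int × Option Int) (h : Int) : Int × Option Int × Option Int :=
  match st with
  | (count, start, t) =>
    match start with
    | none =>
      if t.isSome ∧ h ≤ t.getD 0 + k then (count, none, t)
      else (count + 1, some h, some h)
    | some sv =>
      if h ≤ sv + k then (count, some sv, some h)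
      else if h ≤ t.getD 0 + k then (count, none, t)
      else (count + 1, some h, some h)

def hackerlandRadioTransmitters_alt (x : List Int) (k : Int) : Int :=
  ((PySem.List.sorted x (fun v => v) false).foldl (pvStepB k) (0, none, none)).1

-- ===== PRECONDITION & SPEC =====
-- Pre_ excludes exactly the inputs on which A raises (returns no value): for nonempty x with
-- k < 0 the index i decreases past -len(x) and x_sorted[i] raises IndexError.
def Pre_hackerlandRadioTransmitters (x : List Int) (k : Int) : Prop := x = [] ∨ 0 ≤ k
instance (x : List Int) (k : Int) : Decidable (Pre_hackerlandRadioTransmitters x k) := by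
  unfold Pre_hackerlandRadioTransmitters; infer_instance

def pvWitness_hackerlandRadioTransmitters : List Int × Int := ([1, 5, 10, 11], 3)

def Spec_hackerlandRadioTransmitters (x : List Int) (k : Int) (out : Int) : Prop := out = hackerlandRadioTransmitters_alt x k
instance (x : List Int) (k : Int) (out : Int) : Decidable (Spec_hackerlandRadioTransmitters x k out) := by unfold Spec_hackerlandRadioTransmitters; infer_instance

-- ===== CLAIM (what is proved, stated in full; the proofs are below) =====
def Claim_equal_hackerlandRadioTransmitters : Prop := ∀ (x : List Int) (k : Int), Dom_hackerlandRadioTransmitters x k → Pre_hackerlandRadioTransmitters x k → Spec_hackerlandRadioTransmitters x k (hackerlandRadioTransmitters x k)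

-- ===== LEMMAS AND PROOFS =====

theorem pvGetLastD {α : Type} {l : List α} {d : α} (h : l ≠ []) : l.getLastD d = l.getLast h := by
  simp [List.getLastD_eq_getLast?, List.getLast?_eq_some_getLast h]

theorem pvTakeWhileLenAdd {α : Type} (p : α → Bool) :
    ∀ (m : Nat) (l : List α), (∀ j (hl : j < l.length), j < m → p l[j]) → m ≤ l.length →
      (l.takeWhile p).length = m + ((l.drop m).takeWhile p).length := by
  intro m
  induction m with
  | zero => intro l _ _; simp
  | succ m ih =>
    intro l hp hm
    rcases l with _ | ⟨a, l'⟩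
    · simp at hm
    · have hpa : p a := hp 0 (by simp) (by omega)
      rw [List.takeWhile_cons_of_pos hpa]
      have := ih l' (fun j hl hj => by
        have := hp (j+1) (by simpa using Nat.succ_lt_succ hl) (by omega)
        simpa using this) (by simpa using hm)
      simp [this, List.drop_succ_cons]
      omega

theorem pvDropLenTakeWhile {α : Type} (p : α → Bool) :
    ∀ l : List α, l.drop (l.takeWhile p).length = l.dropWhile p := by
  intro l
  induction l with
  | nil => simp
  | cons a l' ih =>
    by_cases hpa : p a
    · rw [List.takeWhile_cons_of_pos hpa, List.dropWhile_cons_of_pos hpa]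
      simpa using ih
    · rw [List.takeWhile_cons_of_neg (by simpa using hpa),
          List.dropWhile_cons_of_neg (by simpa using hpa)]
      simp

theorem pvTakeWhileGetElem {α : Type} (p : α → Bool) (l : List α) (j : Nat)
    (hj : j < (l.takeWhile p).length) (hl : j < l.length) :
    (l.takeWhile p)[j] = l[j] :=
  (List.takeWhile_prefix p).getElem hj

theorem pvInnerA_eq (s : List Int) (loc : Int) :
    ∀ (fuel : Nat) (i : Nat), ((s.drop i).takeWhile (fun e => decide (e ≤ loc))).length ≤ fuel →
      pvInnerA s loc (i : Int) fuel = (i : Int) + ((s.drop i).takeWhile (fun e => decide (e ≤ loc))).length := by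
  intro fuel
  induction fuel with
  | zero =>
    intro i h
    simp only [Nat.le_zero, List.length_eq_zero_iff] at h
    simp [pvInnerA, h]
  | succ fuel ih =>
    intro i h
    rcases hd : s.drop i with _ | ⟨a, rest⟩
    · have hlen : s.length ≤ i := by
        have := congrArg List.length hd; simp [List.length_drop] at this; omega
      simp [pvInnerA]
      intro hi; omega
    · have hi : i < s.length := by
        have := congrArg List.length hd; simp [List.length_drop] at this; omega
      have hget : PySem.List.pyGet? s (i : Int) = some a := by
        rw [PySem.List.pyGet?_natCast]
        have h0 : (List.drop i s)[0]? = s[i+0]? := List.getElem?_drop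
        simp [hd] at h0
        simp [← h0]
      by_cases ha : a ≤ loc
      · have hrest : s.drop (i+1) = rest := by
          rw [← List.drop_drop]; simp [hd]

        have h' : ((s.drop (i+1)).takeWhile (fun e => decide (e ≤ loc))).length ≤ fuel := by
          rw [hrest]
          simp [hd, ha] at h
          omega
        have hih := ih (i+1) h'
        simp only [pvInnerA]
        rw [if_pos ⟨by exact_mod_cast hi, by simp [hget, ha]⟩]
        push_cast at hih ⊢
        rw [hih, hrest]
        simp [ha]
        ring
      · simp only [pvInnerA]
        rw [if_neg (by simp [hget, ha])]
        simp [ha]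

def pvGCount (k : Int) : Nat → List Int → Int
  | 0, _ => 0
  | _ + 1, [] => 0
  | fuel + 1, h :: l =>
    let t := (((h :: l).takeWhile (fun e => decide (e ≤ h + k))).getLastD h)
    1 + pvGCount k fuel ((h :: l).dropWhile (fun e => decide (e ≤ t + k)))

theorem pvOuterA_eq (s : List Int) (k : Int) (hs : s.Pairwise (· ≤ ·)) (hk : 0 ≤ k) :
    ∀ (fuel : Nat) (i : Nat) (c : Int), i ≤ s.length →
      pvOuterA s k fuel (i : Int) c = c + pvGCount k fuel (s.drop i) := by
  intro fuel
  induction fuel with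
  | zero => intro i c _; simp [pvOuterA, pvGCount]
  | succ fuel ih =>
    intro i c hile
    rcases hd : s.drop i with _ | ⟨a, rest⟩
    · have hlen : s.length ≤ i := by
        have := congrArg List.length hd; simp [List.length_drop] at this; omega
      rw [pvOuterA, if_neg (by push_cast; omega)]
      simp [pvGCount]
    · have hi : i < s.length := by
        have := congrArg List.length hd; simp [List.length_drop] at this; omega
      have hdlen : (s.drop i).length = s.length - i := by simp
      have hgeta : PySem.List.pyGet? s (i : Int) = some a := by
        rw [PySem.List.pyGet?_natCast]
        have h0 : (List.drop i s)[0]? = s[i+0]? := List.getElem?_drop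
        simp [hd] at h0
        simp [← h0]
      have hds : (s.drop i).Pairwise (· ≤ ·) := hs.sublist (List.drop_sublist _ _)
      have hdropj : ∀ (j : Nat) (hjl : j < (s.drop i).length),
          (s.drop i)[j] = s[i + j]'(by rw [hdlen] at hjl; omega) := by
        intro j hjl
        simp [List.getElem_drop]
      set L1 : Nat := ((s.drop i).takeWhile (fun e => decide (e ≤ a + k))).length with hL1
      have hL1pos : 1 ≤ L1 := by
        rw [hL1, hd, List.takeWhile_cons_of_pos (by simp; omega)]
        simp
      have hL1le : L1 ≤ s.length - i := by
        have := (List.takeWhile_sublist (l := s.drop i) (fun e => decide (e ≤ a + k))).length_le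
        rw [hdlen] at this; omega
      have hinner1 : pvInnerA s (a + k) (i : Int) s.length = (i : Int) + L1 := by
        rw [pvInnerA_eq s (a + k) s.length i (by omega), ← hL1]
      have hj : i + (L1 - 1) < s.length := by omega
      set t : Int := s[i + (L1 - 1)] with htdef
      have hgett : PySem.List.pyGet? s ((i + (L1 - 1) : Nat) : Int) = some t := by
        rw [PySem.List.pyGet?_natCast, List.getElem?_eq_getElem hj]
      have htlast : (((s.drop i).takeWhile (fun e => decide (e ≤ a + k))).getLastD a) = t := by
        have hne : ((s.drop i).takeWhile (fun e => decide (e ≤ a + k))) ≠ [] := by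
          intro hnil; rw [hL1, hnil] at hL1pos; simp at hL1pos
        rw [pvGetLastD hne, List.getLast_eq_getElem]
        rw [pvTakeWhileGetElem _ _ _ (by omega) (by rw [hdlen]; omega)]
        rw [hdropj (L1 - 1) (by rw [hdlen]; omega)]
      have hmono : ∀ (p q : Nat) (hp : p < (s.drop i).length) (hq : q < (s.drop i).length), p ≤ q →
          (s.drop i)[p] ≤ (s.drop i)[q] := by
        intro p q hp hq hpq
        rcases Nat.eq_or_lt_of_le hpq with h | h
        · subst h; rfl
        · exact (List.pairwise_iff_getElem.mp hds) p q (by omega) hq h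
      set L2 : Nat := ((s.drop (i + (L1 - 1))).takeWhile (fun e => decide (e ≤ t + k))).length with hL2
      have hL2le : L2 ≤ s.length - (i + (L1 - 1)) := by
        have := (List.takeWhile_sublist (l := s.drop (i + (L1 - 1))) (fun e => decide (e ≤ t + k))).length_le
        simp only [List.length_drop] at this; omega
      have hinner2 : pvInnerA s (t + k) ((i + (L1 - 1) : Nat) : Int) s.length
          = ((i + (L1 - 1) : Nat) : Int) + L2 := by
        rw [pvInnerA_eq s (t + k) s.length (i + (L1 - 1)) (by omega), ← hL2]
      have hLtot : ((s.drop i).takeWhile (fun e => decide (e ≤ t + k))).length = (L1 - 1) + L2 := by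
        have hall : ∀ j (hl : j < (s.drop i).length), j < L1 - 1 →
            (fun e => decide (e ≤ t + k)) (s.drop i)[j] = true := by
          intro j hl hjlt
          have h1 : (s.drop i)[j] ≤ (s.drop i)[L1 - 1]'(by rw [hdlen]; omega) :=
            hmono j (L1 - 1) (by rw [hdlen]; omega) (by rw [hdlen]; omega) (by omega)
          have h2 : (s.drop i)[L1 - 1]'(by rw [hdlen]; omega) = s[i + (L1 - 1)]'hj :=
            hdropj (L1 - 1) (by rw [hdlen]; omega)
          rw [h2, ← htdef] at h1
          simp only [decide_eq_true_eq]
          omega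
        have happ := pvTakeWhileLenAdd (fun e => decide (e ≤ t + k)) (L1 - 1) (s.drop i) hall (by omega)
        rw [happ, List.drop_drop]
      have hrest : s.drop (i + ((L1 - 1) + L2)) = (s.drop i).dropWhile (fun e => decide (e ≤ t + k)) := by
        rw [← pvDropLenTakeWhile (fun e => decide (e ≤ t + k)) (s.drop i), hLtot, List.drop_drop]
      have hfin : i + ((L1 - 1) + L2) ≤ s.length := by omega
      -- assemble the A side
      rw [pvOuterA]
      rw [if_pos (by exact_mod_cast hi)]
      simp only [hgeta, Option.getD_some]
      rw [hinner1]
      have harg : (i : Int) + L1 - 1 = ((i + (L1 - 1) : Nat) : Int) := by omega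
      rw [harg, hgett, Option.getD_some, hinner2]
      have harg2 : ((i + (L1 - 1) : Nat) : Int) + L2 = ((i + ((L1 - 1) + L2) : Nat) : Int) := by
        push_cast; omega
      rw [harg2, ih (i + ((L1 - 1) + L2)) (c + 1) hfin]
      -- the gcount side
      rw [hd] at htlast hrest
      rw [pvGCount]
      rw [htlast, ← hrest]
      ring

theorem pvSortDropAll (c : Int) :
    ∀ l : List Int, l.Pairwise (· ≤ ·) →
      ∀ e ∈ l.dropWhile (fun e => decide (e ≤ c)), c < e := by
  intro l
  induction l with
  | nil => simp
  | cons a l' ih =>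
    intro hp e he
    by_cases ha : a ≤ c
    · rw [List.dropWhile_cons_of_pos (by simpa using ha)] at he
      exact ih hp.of_cons e he
    · rw [List.dropWhile_cons_of_neg (by simpa using ha)] at he
      rcases List.mem_cons.mp he with rfl | he'
      · omega
      · have := (List.pairwise_cons.mp hp).1 e he'
        omega

theorem pvDropWhileAppAll {α : Type} (p : α → Bool) :
    ∀ (u v : List α), (∀ e ∈ u, p e = true) → (u ++ v).dropWhile p = v.dropWhile p := by
  intro u
  induction u with
  | nil => simp
  | cons a u' ih =>
    intro v hall
    rw [List.cons_append, List.dropWhile_cons_of_pos (hall a (by simp))]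
    exact ih v (fun e he => hall e (by simp [he]))

theorem pvFold1 (k : Int) :
    ∀ (l : List Int) (c start t0 : Int), (∀ e ∈ l, e ≤ start + k) →
      l.foldl (pvStepB k) (c, some start, some t0) = (c, some start, some (l.getLastD t0)) := by
  intro l
  induction l with
  | nil => intro c start t0 _; simp
  | cons a l' ih =>
    intro c start t0 hall
    rw [List.foldl_cons]
    have hstep : pvStepB k (c, some start, some t0) a = (c, some start, some a) := by
      simp [pvStepB, hall a (by simp)]
    rw [hstep, ih c start a (fun e he => hall e (by simp [he])), List.getLastD_cons]

theorem pvFold2n (k : Int) :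
    ∀ (l : List Int) (c t0 : Int), (∀ e ∈ l, e ≤ t0 + k) →
      l.foldl (pvStepB k) (c, none, some t0) = (c, none, some t0) := by
  intro l
  induction l with
  | nil => intro c t0 _; simp
  | cons a l' ih =>
    intro c t0 hall
    rw [List.foldl_cons]
    have hstep : pvStepB k (c, none, some t0) a = (c, none, some t0) := by
      simp [pvStepB, hall a (by simp)]
    rw [hstep, ih c t0 (fun e he => hall e (by simp [he]))]

theorem pvFold2s (k : Int) :
    ∀ (l : List Int) (c start t0 : Int), (∀ e ∈ l, start + k < e ∧ e ≤ t0 + k) →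
      l.foldl (pvStepB k) (c, some start, some t0)
        = (c, if l.isEmpty then some start else none, some t0) := by
  intro l
  induction l with
  | nil => intro c start t0 _; simp
  | cons a l' _ =>
    intro c start t0 hall
    rw [List.foldl_cons]
    have h1 := hall a (by simp)
    have hstep : pvStepB k (c, some start, some t0) a = (c, none, some t0) := by
      simp only [pvStepB, Option.getD_some]
      rw [if_neg (by omega), if_pos (by omega)]
    rw [hstep, pvFold2n k l' c t0 (fun e he => (hall e (by simp [he])).2)]
    simp

theorem pvFoldB_eq (k : Int) (hk : 0 ≤ k) :
    ∀ (fuel : Nat) (d : List Int) (c : Int) (st t : Option Int),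
      d.Pairwise (· ≤ ·) → d.length ≤ fuel →
      ((st = none ∧ t = none) ∨
        (∃ tv, t = some tv ∧ (∀ e ∈ d, tv + k < e) ∧
          (st = none ∨ ∃ a, st = some a ∧ a ≤ tv))) →
      (d.foldl (pvStepB k) (c, st, t)).1 = c + pvGCount k fuel d := by
  intro fuel
  induction fuel with
  | zero =>
    intro d c st t _ hlen _
    have : d = [] := List.length_eq_zero_iff.mp (by omega)
    subst this
    simp [pvGCount]
  | succ fuel ih =>
    intro d c st t hp hlen hgood
    rcases d with _ | ⟨h, l⟩
    · simp [pvGCount]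
    · -- the first step always opens a new group
      have hstep : pvStepB k (c, st, t) h = (c + 1, some h, some h) := by
        rcases hgood with ⟨hst, ht⟩ | ⟨tv, ht, hlt, hst⟩
        · subst hst; subst ht; simp [pvStepB]
        · subst ht
          have hlt' : tv + k < h := hlt h (by simp)
          rcases hst with hst | ⟨a, hst, ha⟩
          · subst hst
            simp only [pvStepB, Option.getD_some]
            rw [if_neg (by simp; omega)]
          · subst hst
            simp only [pvStepB, Option.getD_some]
            rw [if_neg (by omega), if_neg (by omega)]
      rw [List.foldl_cons, hstep]
      have hpl : l.Pairwise (· ≤ ·) := hp.of_cons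
      have hhl : ∀ e ∈ l, h ≤ e := (List.pairwise_cons.mp hp).1
      -- the three pieces of l
      set P1 : List Int := l.takeWhile (fun e => decide (e ≤ h + k)) with hP1
      set l2 : List Int := l.dropWhile (fun e => decide (e ≤ h + k)) with hl2
      set tstar : Int := P1.getLastD h with htstar
      set P2 : List Int := l2.takeWhile (fun e => decide (e ≤ tstar + k)) with hP2
      set R : List Int := l2.dropWhile (fun e => decide (e ≤ tstar + k)) with hR
      have hsplit : l = P1 ++ (P2 ++ R) := by
        rw [hP2, hR, hl2, hP1]
        rw [List.takeWhile_append_dropWhile, List.takeWhile_append_dropWhile]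
      have hht : h ≤ tstar := by
        rw [htstar]
        rcases hP1nil : P1 with _ | ⟨b, P1'⟩
        · simp
        · rw [← hP1nil]
          have hne : P1 ≠ [] := by rw [hP1nil]; simp
          rw [pvGetLastD hne]
          have hmem : P1.getLast hne ∈ P1 := List.getLast_mem hne
          have hsub : ∀ y ∈ P1, y ∈ l := fun y hy => (List.takeWhile_sublist _).mem (hP1 ▸ hy)
          exact hhl _ (hsub _ hmem)
      have hl2all : ∀ e ∈ l2, h + k < e := by
        intro e he
        exact pvSortDropAll (h + k) l hpl e (hl2 ▸ he)
      have hl2p : l2.Pairwise (· ≤ ·) := hpl.sublist (List.dropWhile_sublist _)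
      have hRall : ∀ e ∈ R, tstar + k < e := by
        intro e he
        exact pvSortDropAll (tstar + k) l2 hl2p e (hR ▸ he)
      -- fold over the pieces
      conv_lhs => rw [hsplit]
      rw [List.foldl_append]
      rw [pvFold1 k P1 (c+1) h h (by
        intro e he
        have := List.mem_takeWhile_imp (hP1 ▸ he)
        simpa using this)]
      rw [show P1.getLastD h = tstar from rfl]
      rw [List.foldl_append]
      rw [pvFold2s k P2 (c+1) h tstar (by
        intro e he
        have h1 := List.mem_takeWhile_imp (l := l2) (p := fun e => decide (e ≤ tstar + k)) (hP2 ▸ he)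
        have h2 := hl2all e ((List.takeWhile_sublist (l := l2) _).mem (hP2 ▸ he))
        simp at h1
        exact ⟨h2, h1⟩)]
      -- invariant for the tail R
      have hgoodR : ((if P2.isEmpty then some h else none) = none ∧ (some tstar : Option Int) = none) ∨
          (∃ tv, (some tstar : Option Int) = some tv ∧ (∀ e ∈ R, tv + k < e) ∧
            ((if P2.isEmpty then some h else none) = none ∨
              ∃ a, (if P2.isEmpty then some h else none) = some a ∧ a ≤ tv)) := by
        right
        refine ⟨tstar, rfl, hRall, ?_⟩
        by_cases hP2e : P2.isEmpty
        · right; exact ⟨h, by rw [if_pos hP2e], hht⟩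
        · left; rw [if_neg hP2e]
      have hRp : R.Pairwise (· ≤ ·) := hl2p.sublist (List.dropWhile_sublist _)
      have hRlen : R.length ≤ fuel := by
        have h1 : l2.length ≤ l.length := (List.dropWhile_sublist _).length_le
        have h2 : R.length ≤ l2.length := (List.dropWhile_sublist _).length_le
        simp only [List.length_cons] at hlen
        omega
      rw [ih R (c+1) _ _ hRp hRlen hgoodR]
      -- the gcount side
      rw [pvGCount]
      have htw : (h :: l).takeWhile (fun e => decide (e ≤ h + k)) = h :: P1 := by
        rw [List.takeWhile_cons_of_pos (by simp; omega), hP1]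
      rw [htw, List.getLastD_cons, ← htstar]
      have hdw : (h :: l).dropWhile (fun e => decide (e ≤ tstar + k)) = R := by
        rw [List.dropWhile_cons_of_pos (by simp; omega)]
        conv_lhs => rw [hsplit]
        rw [← List.append_assoc]
        rw [pvDropWhileAppAll _ (P1 ++ P2) R ?_]
        · rcases hRc : R with _ | ⟨b, r⟩
          · simp
          · rw [List.dropWhile_cons_of_neg (by
              have := hRall b (by rw [hRc]; simp)
              simp; omega)]
        · intro e he
          rcases List.mem_append.mp he with he1 | he2
          · have := List.mem_takeWhile_imp (hP1 ▸ he1)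
            simp at this ⊢
            omega
          · have := List.mem_takeWhile_imp (l := l2) (hP2 ▸ he2)
            simpa using this
      rw [hdw]
      ring

theorem pvSortedPairwise (x : List Int) :
    (PySem.List.sorted x (fun v => v) false).Pairwise (· ≤ ·) := by
  have := PySem.List.sorted_pairwise (xs := x) (key := fun v => v)
  simpa using this

-- ===== VERDICT (by name: the statement is the Claim_ definition above) =====
theorem hackerlandRadioTransmitters_spec : Claim_equal_hackerlandRadioTransmitters := by
  intro x k _ hpre
  unfold Spec_hackerlandRadioTransmitters
  unfold hackerlandRadioTransmitters hackerlandRadioTransmitters_alt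
  have hs := pvSortedPairwise x
  rcases hpre with rfl | hk
  · simp [pvOuterA, PySem.List.sorted]
  · have hA := pvOuterA_eq (PySem.List.sorted x (fun v => v) false) k hs hk
      ((PySem.List.sorted x (fun v => v) false).length + 1) 0 0 (by omega)
    have hB := pvFoldB_eq k hk ((PySem.List.sorted x (fun v => v) false).length + 1)
      (PySem.List.sorted x (fun v => v) false) 0 none none hs (by omega) (Or.inl ⟨rfl, rfl⟩)
    simp only [Nat.cast_zero, List.drop_zero] at hA
    rw [hA, hB]
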